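-- pv_equiv track=rewrite | github.com/francosalvucci14/TesiTriennale | Temporal_Tree_tests/algoritmo_FUNZIONANTE.py | compress_timestamps
-- ===== SOURCE A (Python) =====
-- def compress_timestamps(adj_list):
--     # Estrai tutti i timestamp
--     all_timestamps = set()
--     for u in adj_list:
--         for v, timestamps in adj_list[u]:
--             all_timestamps.update(timestamps)
--
--     # Ordina e assegna un indice a ogni timestamp per la compressione
--     sorted_timestamps = sorted(all_timestamps)
--     timestamp_index = {t: i for i, t in enumerate(sorted_timestamps)}
--     return timestamp_index, sorted_timestamps
-- ===== SOURCE B (Python) =====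
-- def compress_timestamps(adj_list):
--     # Incremental insertion: maintain the sorted distinct timestamp list at all
--     # times; each timestamp is placed at its position as soon as it is seen.
--     # No set is ever built and no sort is ever called.
--     sorted_timestamps = []
--     for u in adj_list:
--         for v, timestamps in adj_list[u]:
--             for t in timestamps:
--                 i = 0
--                 while i < len(sorted_timestamps) and sorted_timestamps[i] < t:
--                     i += 1
--                 if i == len(sorted_timestamps) or sorted_timestamps[i] != t:
--                     sorted_timestamps.insert(i, t)
--     timestamp_index = {t: i for i, t in enumerate(sorted_timestamps)}
--     return timestamp_index, sorted_timestamps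
-- ===== Notes on version B (the rewrite author's own statement) =====
-- stated objective: alternative
-- what changed: B never builds a set and never calls sort: it maintains the sorted distinct timestamp list incrementally, inserting each timestamp at its position (skipping ones already present) as it is seen, then builds the index dict; A collects a set and sorts it afterwards.
import Mathlib
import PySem

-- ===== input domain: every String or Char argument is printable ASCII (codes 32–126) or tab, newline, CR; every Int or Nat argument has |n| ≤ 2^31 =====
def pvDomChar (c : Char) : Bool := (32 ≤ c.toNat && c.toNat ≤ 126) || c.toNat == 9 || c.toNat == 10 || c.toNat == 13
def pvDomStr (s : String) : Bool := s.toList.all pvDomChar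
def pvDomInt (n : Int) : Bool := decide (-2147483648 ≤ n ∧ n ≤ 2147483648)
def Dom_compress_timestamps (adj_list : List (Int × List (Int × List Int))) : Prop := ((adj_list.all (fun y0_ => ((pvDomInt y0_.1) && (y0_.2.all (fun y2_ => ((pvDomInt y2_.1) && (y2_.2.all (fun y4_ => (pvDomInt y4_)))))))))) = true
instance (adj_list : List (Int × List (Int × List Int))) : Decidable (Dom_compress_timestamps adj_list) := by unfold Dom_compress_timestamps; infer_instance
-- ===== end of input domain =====

-- B maintains the sorted distinct timestamp list incrementally (ordered insertion as each
-- timestamp is seen) instead of A's set accumulation followed by a sort (objective: alternative).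

-- ===== PORT A =====
-- 'for u in adj_list: for v, timestamps in adj_list[u]': dict iteration visits the keys,
-- 'adj_list[u]' is first-match lookup; u is a key of adj_list so the .getD default is never read.
def compress_timestamps (adj_list : List (Int × List (Int × List Int))) : (List (Int × Int)) × List Int :=
  let all_timestamps : PySem.Set Int :=
    adj_list.foldl (fun s u =>
      ((adj_list.lookup u.1).getD []).foldl (fun s vt => PySem.Set.update s vt.2) s)
      PySem.Set.empty
  let sorted_timestamps := PySem.List.sorted all_timestamps (fun x => x) false
  let timestamp_index : PySem.Dict Int Int :=
    (PySem.List.enumerate sorted_timestamps 0).foldl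
      (fun d it => d.insert it.2 it.1) PySem.Dict.empty
  (timestamp_index.items, sorted_timestamps)

-- ===== PORT B =====
-- the while-loop scan to the insertion point + conditional list.insert of Source B,
-- as the obvious structural recursion over the maintained sorted list
def pvInsUnique (xs : List Int) (t : Int) : List Int :=
  match xs with
  | [] => [t]
  | x :: rest => if x < t then x :: pvInsUnique rest t
                 else if x = t then x :: rest
                 else t :: x :: rest

def compress_timestamps_alt (adj_list : List (Int × List (Int × List Int))) : (List (Int × Int)) × List Int :=
  let sorted_timestamps : List Int :=
    adj_list.foldl (fun st u =>
      ((adj_list.lookup u.1).getD []).foldl (fun st vt =>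
        vt.2.foldl (fun st t => pvInsUnique st t) st) st) []
  let timestamp_index : PySem.Dict Int Int :=
    (PySem.List.enumerate sorted_timestamps 0).foldl
      (fun d it => d.insert it.2 it.1) PySem.Dict.empty
  (timestamp_index.items, sorted_timestamps)

-- ===== PRECONDITION & SPEC =====
def Spec_compress_timestamps (adj_list : List (Int × List (Int × List Int))) (out : (List (Int × Int)) × List Int) : Prop := out = compress_timestamps_alt adj_list
instance (adj_list : List (Int × List (Int × List Int))) (out : (List (Int × Int)) × List Int) : Decidable (Spec_compress_timestamps adj_list out) := by unfold Spec_compress_timestamps; infer_instance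

-- ===== CLAIM (what is proved, stated in full; the proofs are below) =====
def Claim_equal_compress_timestamps : Prop := ∀ (adj_list : List (Int × List (Int × List Int))), Dom_compress_timestamps adj_list → Spec_compress_timestamps adj_list (compress_timestamps adj_list)

-- ===== LEMMAS AND PROOFS =====

-- A's nested Set.update loop is Set.update of the flattened list
theorem pvSetFold {α : Type} (g : α → List Int) :
    ∀ (l : List α) (s : PySem.Set Int),
      l.foldl (fun s x => PySem.Set.update s (g x)) s
        = PySem.Set.update s (l.flatMap g) := by
  intro l
  induction l with
  | nil => intro s; simp [PySem.Set.update]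
  | cons x xs ih =>
    intro s
    rw [List.foldl_cons, List.flatMap_cons, ih]
    simp [PySem.Set.update, List.foldl_append]

-- folding element-wise over each block is folding over the flattened list
theorem pvFoldFlat {α : Type} (f : List Int → Int → List Int) (g : α → List Int) :
    ∀ (l : List α) (acc : List Int),
      l.foldl (fun st x => (g x).foldl f st) acc = (l.flatMap g).foldl f acc := by
  intro l
  induction l with
  | nil => intro acc; rfl
  | cons x xs ih => intro acc; rw [List.foldl_cons, List.flatMap_cons, List.foldl_append, ih]

-- ordered insertion preserves strict sortedness and adds exactly t to the elements
theorem pvIns_spec :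
    ∀ (acc : List Int) (t : Int), acc.Pairwise (· < ·) →
      (pvInsUnique acc t).Pairwise (· < ·) ∧
      ∀ x, x ∈ pvInsUnique acc t ↔ x ∈ acc ∨ x = t := by
  intro acc
  induction acc with
  | nil => intro t _; simp [pvInsUnique]
  | cons x rest ih =>
    intro t hp
    have hx : ∀ y ∈ rest, x < y := fun y hy => List.rel_of_pairwise_cons hp hy
    have hrest : rest.Pairwise (· < ·) := hp.of_cons
    by_cases h1 : x < t
    · have ih' := ih t hrest
      rw [pvInsUnique, if_pos h1]
      constructor
      · refine List.pairwise_cons.mpr ⟨?_, ih'.1⟩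
        intro y hy
        rcases (ih'.2 y).mp hy with hy' | rfl
        · exact hx y hy'
        · exact h1
      · intro y
        rw [List.mem_cons, ih'.2 y, List.mem_cons]
        tauto
    · by_cases h2 : x = t
      · rw [pvInsUnique, if_neg h1, if_pos h2]
        refine ⟨hp, fun y => ?_⟩
        subst h2
        simp [List.mem_cons]
        tauto
      · rw [pvInsUnique, if_neg h1, if_neg h2]
        have htx : t < x := lt_of_le_of_ne (not_lt.mp h1) (fun he => h2 he.symm)
        constructor
        · refine List.pairwise_cons.mpr ⟨?_, hp⟩
          intro y hy
          rcases List.mem_cons.mp hy with rfl | hy'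
          · exact htx
          · exact htx.trans (hx y hy')
        · intro y; simp [List.mem_cons]; tauto

-- the insertion fold keeps the list strictly sorted with elements acc ∪ L
theorem pvFoldIns :
    ∀ (L acc : List Int), acc.Pairwise (· < ·) →
      (L.foldl pvInsUnique acc).Pairwise (· < ·) ∧
      ∀ x, x ∈ L.foldl pvInsUnique acc ↔ x ∈ acc ∨ x ∈ L := by
  intro L
  induction L with
  | nil => intro acc h; simp [h]
  | cons t ts ih =>
    intro acc h
    have hins := pvIns_spec acc t h
    have ih' := ih (pvInsUnique acc t) hins.1
    rw [List.foldl_cons]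
    refine ⟨ih'.1, fun x => ?_⟩
    rw [ih'.2 x, hins.2 x, List.mem_cons]
    tauto

-- starting from [], the insertion fold is exactly sorted(set(L))
theorem pvFoldIns_sorted (L : List Int) :
    L.foldl pvInsUnique [] = PySem.List.sorted (PySem.Set.ofList L) (fun x => x) false := by
  have h := pvFoldIns L [] (by simp)
  refine Eq.symm (PySem.List.sorted_eq_of_perm_of_pairwise_lt (key := fun x : Int => x) _ _ ?_ ?_)
  · apply (List.perm_ext_iff_of_nodup ?_ ?_).mpr
    · intro a
      rw [h.2 a]
      simp [PySem.Set.mem_ofList]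
    · exact h.1.imp ne_of_lt
    · exact PySem.Set.nodup_ofList L
  · exact h.1

-- ===== VERDICT (by name: the statement is the Claim_ definition above) =====
theorem compress_timestamps_spec : Claim_equal_compress_timestamps := by
  intro adj_list _
  unfold Spec_compress_timestamps
  simp only [compress_timestamps, compress_timestamps_alt]
  simp only [pvSetFold, pvFoldFlat]
  have hset : ∀ (F : List Int),
      PySem.Set.update PySem.Set.empty F = PySem.Set.ofList F := by
    intro F
    simp [PySem.Set.update, PySem.Set.empty, PySem.Set.ofList_eq_foldl]
  rw [hset]
  simp only [pvFoldIns_sorted]
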